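-- pv_equiv track=rewrite | github.com/SeolJaeHyeok/TIL | Algorithm/WTC/GCT/3.py | solution
-- ===== SOURCE A (Python) =====
-- from itertools import combinations
--
-- def solution(arr, k, t):
--     answer = 0
--     for i in range(k, len(arr) + 1):
--         # k개 이상 선택하는 모든 경우의 수
--         tmp = list(combinations(arr, i))
--         for j in tmp:
--             # 각 경우의 수의 보장 금액의 합이 t 이하일 경우 카운팅
--             if sum(j) <= t:
--                 answer += 1
--
--     return answer
-- ===== SOURCE B (Python) =====
-- def solution(arr, k, t):
--     # Knapsack-style DP: one dict of (chosen-count, running-sum) -> multiplicity,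
--     # folded over the array once; merging equal states collapses the per-size
--     # combinations enumeration of A.
--     states = {(0, 0): 1}
--     for x in arr:
--         nxt = {}
--         for (c, s), m in states.items():
--             nxt[(c, s)] = nxt.get((c, s), 0) + m
--             nxt[(c + 1, s + x)] = nxt.get((c + 1, s + x), 0) + m
--         states = nxt
--     return sum(m for (c, s), m in states.items() if c >= k and s <= t)
-- ===== Notes on version B (the rewrite author's own statement) =====
-- stated objective: faster
-- what changed: Replaced A's per-size enumeration of all itertools.combinations with a single knapsack-style fold maintaining a dict (chosen-count, running-sum) -> multiplicity, counting matching states at the end.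
import Mathlib
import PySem

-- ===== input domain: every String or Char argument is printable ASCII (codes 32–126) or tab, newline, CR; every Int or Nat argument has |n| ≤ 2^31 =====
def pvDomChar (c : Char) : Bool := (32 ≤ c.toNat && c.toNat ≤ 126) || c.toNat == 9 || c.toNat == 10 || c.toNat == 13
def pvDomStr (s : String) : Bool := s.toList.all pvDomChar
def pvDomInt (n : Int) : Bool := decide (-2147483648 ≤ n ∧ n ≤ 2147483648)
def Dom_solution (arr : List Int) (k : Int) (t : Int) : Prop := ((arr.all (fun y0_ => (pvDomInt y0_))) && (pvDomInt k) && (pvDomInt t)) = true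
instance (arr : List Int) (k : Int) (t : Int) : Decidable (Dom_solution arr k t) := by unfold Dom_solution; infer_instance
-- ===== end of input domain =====

-- B replaces A's per-size enumeration of all combinations with a single knapsack-style
-- fold over the array maintaining a dict (chosen-count, running-sum) -> multiplicity;
-- objective: faster (merging equal states collapses the exponential enumeration on
-- inputs with repeated partial sums).

-- ===== PORT A =====
-- itertools.combinations(arr, n): the length-n sublists of arr (library call, ported by hand)
def combosA : List Int → Nat → List (List Int)
  | _, 0 => [[]]
  | [], _ + 1 => []
  | x :: r, n + 1 => (combosA r n).map (fun c => x :: c) ++ combosA r (n + 1)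
  termination_by xs _ => xs.length

def solution (arr : List Int) (k : Int) (t : Int) : Int :=
  (PySem.List.pyRange k ((arr.length : Int) + 1) 1).foldl
    (fun answer i =>
      let tmp := combosA arr i.toNat
      tmp.foldl (fun answer j => if j.sum ≤ t then answer + 1 else answer) answer)
    0

-- ===== PORT B =====
def stepB (x : Int) (states : PySem.Dict (Int × Int) Int) : PySem.Dict (Int × Int) Int :=
  states.items.foldl
    (fun nxt p =>
      (nxt.modify p.1 0 (· + p.2)).modify (p.1.1 + 1, p.1.2 + x) 0 (· + p.2))
    PySem.Dict.empty

def solution_alt (arr : List Int) (k : Int) (t : Int) : Int :=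
  let states := arr.foldl (fun states x => stepB x states)
    (PySem.Dict.ofList [(((0 : Int), (0 : Int)), (1 : Int))])
  states.items.foldl (fun acc p => if k ≤ p.1.1 ∧ p.1.2 ≤ t then acc + p.2 else acc) 0

-- ===== PRECONDITION & SPEC =====
-- Pre_ excludes k < 0, where A raises ValueError (combinations with negative r).
def Pre_solution (arr : List Int) (k : Int) (t : Int) : Prop := 0 ≤ k
instance (arr : List Int) (k : Int) (t : Int) : Decidable (Pre_solution arr k t) := by
  unfold Pre_solution; infer_instance

def pvWitness_solution : List Int × Int × Int := ([1, 2, 3], 1, 3)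

def Spec_solution (arr : List Int) (k : Int) (t : Int) (out : Int) : Prop := out = solution_alt arr k t
instance (arr : List Int) (k : Int) (t : Int) (out : Int) : Decidable (Spec_solution arr k t out) := by
  unfold Spec_solution; infer_instance

-- ===== CLAIM (what is proved, stated in full; the proofs are below) =====
def Claim_equal_solution : Prop := ∀ (arr : List Int) (k : Int) (t : Int),
  Dom_solution arr k t → Pre_solution arr k t → Spec_solution arr k t (solution arr k t)

-- ===== LEMMAS AND PROOFS =====

-- weighted count of a dict's entries whose key satisfies φ
def wsum (φ : Int × Int → Prop) [DecidablePred φ] (d : PySem.Dict (Int × Int) Int) : Int :=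
  (d.items.map (fun p => if φ p.1 then p.2 else 0)).sum

lemma wsum_congr (φ ψ : Int × Int → Prop) [DecidablePred φ] [DecidablePred ψ]
    (h : ∀ p, φ p ↔ ψ p) (d : PySem.Dict (Int × Int) Int) : wsum φ d = wsum ψ d := by
  unfold wsum
  congr 1
  apply List.map_congr_left
  intro p _
  by_cases hp : φ p.1
  · rw [if_pos hp, if_pos ((h p.1).1 hp)]
  · rw [if_neg hp, if_neg (fun hq => hp ((h p.1).2 hq))]

lemma foldl_ite_add (φ : Int × Int → Prop) [DecidablePred φ]
    (l : List ((Int × Int) × Int)) (a : Int) :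
    l.foldl (fun acc p => if φ p.1 then acc + p.2 else acc) a
      = a + (l.map (fun p => if φ p.1 then p.2 else 0)).sum := by
  induction l generalizing a with
  | nil => simp
  | cons p l ih =>
    simp only [List.foldl_cons, List.map_cons, List.sum_cons, ih]
    split_ifs <;> ring

lemma sum_map_update {α : Type} (l : List α) (a : α) (f g : α → Int)
    (hl : l.Nodup) (ha : a ∈ l) (h : ∀ b ∈ l, b ≠ a → f b = g b) :
    (l.map f).sum = (l.map g).sum + (f a - g a) := by
  induction l with
  | nil => cases ha
  | cons b l ih =>
    rcases List.mem_cons.1 ha with rfl | hmem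
    · have hnotin : a ∉ l := (List.nodup_cons.1 hl).1
      have : l.map f = l.map g := by
        apply List.map_congr_left
        intro c hc
        exact h c (List.mem_cons_of_mem _ hc) (fun hca => hnotin (hca ▸ hc))
      simp only [List.map_cons, List.sum_cons, this]
      ring
    · have hba : b ≠ a := fun hba => (List.nodup_cons.1 hl).1 (hba ▸ hmem)
      have hfb : f b = g b := h b (List.mem_cons_self) hba
      simp only [List.map_cons, List.sum_cons, hfb,
        ih (List.nodup_cons.1 hl).2 hmem (fun c hc => h c (List.mem_cons_of_mem _ hc))]
      ring

lemma nodup_keys_modify (d : PySem.Dict (Int × Int) Int) (key : Int × Int) (d0 : Int)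
    (f : Int → Int) (hnd : d.keys.Nodup) : (d.modify key d0 f).keys.Nodup := by
  rw [PySem.Dict.keys_modify]
  exact PySem.Dict.nodup_keys_insert _ _ _ hnd

lemma wsum_modify (φ : Int × Int → Prop) [DecidablePred φ]
    (d : PySem.Dict (Int × Int) Int) (hnd : d.keys.Nodup) (key : Int × Int) (m : Int) :
    wsum φ (d.modify key 0 (· + m)) = wsum φ d + (if φ key then m else 0) := by
  have hnd' := nodup_keys_modify d key 0 (· + m) hnd
  unfold wsum
  rw [PySem.Dict.items_eq_map_keys d hnd 0, PySem.Dict.items_eq_map_keys _ hnd' 0,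
    List.map_map, List.map_map]
  by_cases hc : key ∈ d.keys
  · have hcont : d.contains key = true := by
      rw [PySem.Dict.contains_eq_decide_mem_keys]; exact decide_eq_true hc
    have hkeys : (d.modify key 0 (· + m)).keys = d.keys := by
      rw [PySem.Dict.keys_modify, PySem.Dict.keys_insert_of_contains _ _ hcont]
    rw [hkeys]
    rw [sum_map_update d.keys key
      ((fun p => if φ p.1 then p.2 else 0) ∘ fun kk => (kk, (d.modify key 0 (· + m)).getD kk 0))
      ((fun p => if φ p.1 then p.2 else 0) ∘ fun kk => (kk, d.getD kk 0))
      hnd hc (fun b _ hb => by simp [Function.comp, PySem.Dict.getD_modify, hb])]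
    simp only [Function.comp, PySem.Dict.getD_modify]
    split_ifs <;> ring
  · have hcont : d.contains key = false := by
      rw [PySem.Dict.contains_eq_decide_mem_keys]; exact decide_eq_false hc
    have hkeys : (d.modify key 0 (· + m)).keys = d.keys ++ [key] := by
      rw [PySem.Dict.keys_modify, PySem.Dict.keys_insert_of_not_contains _ _ hcont]
    rw [hkeys, List.map_append, List.sum_append]
    have h1 : d.keys.map ((fun p => if φ p.1 then p.2 else 0) ∘
        fun k => (k, (d.modify key 0 (· + m)).getD k 0))
        = d.keys.map ((fun p => if φ p.1 then p.2 else 0) ∘ fun k => (k, d.getD k 0)) := by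
      apply List.map_congr_left
      intro b hb
      have hbk : b ≠ key := fun hbk => hc (hbk ▸ hb)
      simp [Function.comp, PySem.Dict.getD_modify, hbk]
    rw [h1]
    have h0 : d.getD key 0 = 0 := PySem.Dict.getD_of_not_contains d 0 hcont
    simp [Function.comp, PySem.Dict.getD_modify, h0]

lemma stepB_core (x : Int) (φ : Int × Int → Prop) [DecidablePred φ]
    (l : List ((Int × Int) × Int)) :
    ∀ (e : PySem.Dict (Int × Int) Int), e.keys.Nodup →
      (l.foldl (fun nxt p =>
          (nxt.modify p.1 0 (· + p.2)).modify (p.1.1 + 1, p.1.2 + x) 0 (· + p.2)) e).keys.Nodup ∧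
      wsum φ (l.foldl (fun nxt p =>
          (nxt.modify p.1 0 (· + p.2)).modify (p.1.1 + 1, p.1.2 + x) 0 (· + p.2)) e)
        = wsum φ e + (l.map (fun p =>
            (if φ p.1 then p.2 else 0) + (if φ (p.1.1 + 1, p.1.2 + x) then p.2 else 0))).sum := by
  induction l with
  | nil => intro e he; exact ⟨he, by simp⟩
  | cons p l ih =>
    intro e he
    have he1 : ((e.modify p.1 0 (· + p.2)).modify (p.1.1 + 1, p.1.2 + x) 0 (· + p.2)).keys.Nodup :=
      nodup_keys_modify _ _ _ _ (nodup_keys_modify _ _ _ _ he)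
    obtain ⟨hn, hw⟩ := ih _ he1
    refine ⟨hn, ?_⟩
    simp only [List.foldl_cons] at hw ⊢
    rw [hw, wsum_modify φ _ (nodup_keys_modify _ _ _ _ he) _ _, wsum_modify φ _ he _ _]
    simp only [List.map_cons, List.sum_cons]
    ring

lemma wsum_stepB (x : Int) (φ : Int × Int → Prop) [DecidablePred φ]
    (d : PySem.Dict (Int × Int) Int) :
    wsum φ (stepB x d) = wsum φ d + wsum (fun p => φ (p.1 + 1, p.2 + x)) d := by
  obtain ⟨_, hw⟩ := stepB_core x φ d.items PySem.Dict.empty PySem.Dict.nodup_keys_empty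
  unfold stepB
  rw [hw]
  have hempty : wsum φ PySem.Dict.empty = 0 := rfl
  rw [hempty, zero_add, PySem.List.sum_map_add_int]
  rfl

lemma nodup_keys_stepB (x : Int) (d : PySem.Dict (Int × Int) Int) : (stepB x d).keys.Nodup := by
  obtain ⟨hn, _⟩ := stepB_core x (fun _ => True) d.items PySem.Dict.empty
    PySem.Dict.nodup_keys_empty
  exact hn

lemma fold_inv (xs : List Int) :
    ∀ (d : PySem.Dict (Int × Int) Int), d.keys.Nodup →
    ∀ (φ : Int × Int → Prop) [DecidablePred φ],
      wsum φ (xs.foldl (fun states x => stepB x states) d)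
        = (xs.sublists'.map (fun s =>
            wsum (fun p => φ (p.1 + s.length, p.2 + s.sum)) d)).sum := by
  induction xs with
  | nil =>
    intro d _ φ _
    simp only [List.foldl_nil, List.sublists'_nil, List.map_cons, List.map_nil,
      List.sum_cons, List.sum_nil, List.length_nil, List.sum_nil]
    rw [wsum_congr φ (fun p => φ (p.1 + ((0 : Nat) : Int), p.2 + 0)) (by intro p; norm_num)]
    norm_num
  | cons x xs ih =>
    intro d hnd φ _
    simp only [List.foldl_cons]
    rw [ih (stepB x d) (nodup_keys_stepB x d) φ]
    have hstep : ∀ s : List Int,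
        wsum (fun p => φ (p.1 + s.length, p.2 + s.sum)) (stepB x d)
          = wsum (fun p => φ (p.1 + s.length, p.2 + s.sum)) d
            + wsum (fun p => φ (p.1 + (x :: s).length, p.2 + (x :: s).sum)) d := by
      intro s
      rw [wsum_stepB x (fun p => φ (p.1 + s.length, p.2 + s.sum)) d]
      congr 1
      apply wsum_congr
      intro p
      have : p.1 + 1 + (s.length : Int) = p.1 + ((x :: s).length : Int) := by
        simp [List.length_cons]; push_cast; ring
      rw [this]
      have : p.2 + x + s.sum = p.2 + (x :: s).sum := by simp [List.sum_cons]; ring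
      rw [this]
    calc (xs.sublists'.map (fun s =>
            wsum (fun p => φ (p.1 + s.length, p.2 + s.sum)) (stepB x d))).sum
        = (xs.sublists'.map (fun s =>
            wsum (fun p => φ (p.1 + s.length, p.2 + s.sum)) d
            + wsum (fun p => φ (p.1 + (x :: s).length, p.2 + (x :: s).sum)) d)).sum := by
          congr 1; exact List.map_congr_left (fun s _ => hstep s)
      _ = (xs.sublists'.map (fun s =>
            wsum (fun p => φ (p.1 + s.length, p.2 + s.sum)) d)).sum
          + (xs.sublists'.map (fun s =>
            wsum (fun p => φ (p.1 + (x :: s).length, p.2 + (x :: s).sum)) d)).sum := by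
          rw [← PySem.List.sum_map_add_int]
      _ = ((x :: xs).sublists'.map (fun s =>
            wsum (fun p => φ (p.1 + s.length, p.2 + s.sum)) d)).sum := by
          rw [List.sublists'_cons, List.map_append, List.sum_append, List.map_map]
          congr 1

lemma alt_eq_countP (arr : List Int) (k t : Int) :
    solution_alt arr k t
      = ((arr.sublists'.countP (fun s => decide (k ≤ (s.length : Int) ∧ s.sum ≤ t)) : Nat) : Int) := by
  unfold solution_alt
  rw [foldl_ite_add (fun p => k ≤ p.1 ∧ p.2 ≤ t)]
  have h0 : (PySem.Dict.ofList [(((0 : Int), (0 : Int)), (1 : Int))]).keys.Nodup := by decide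
  have := fold_inv arr (PySem.Dict.ofList [(((0 : Int), (0 : Int)), (1 : Int))]) h0
    (fun p => k ≤ p.1 ∧ p.2 ≤ t)
  unfold wsum at this
  rw [zero_add, this]
  have : ∀ s : List Int,
      (((PySem.Dict.ofList [(((0 : Int), (0 : Int)), (1 : Int))]).items).map
        (fun p => if k ≤ p.1.1 + (s.length : Int) ∧ p.1.2 + s.sum ≤ t then p.2 else 0)).sum
      = if decide (k ≤ (s.length : Int) ∧ s.sum ≤ t) = true then (1 : Int) else 0 := by
    intro s
    show (if k ≤ (0 : Int) + (s.length : Int) ∧ (0 : Int) + s.sum ≤ t then (1 : Int) else 0) + 0 = _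
    simp
  rw [List.map_congr_left (fun s _ => this s), PySem.List.sum_map_ite_one_zero]

-- A side
lemma combosA_perm (xs : List Int) : ∀ n, (combosA xs n).Perm (List.sublistsLen n xs) := by
  induction xs with
  | nil => intro n; cases n <;> simp [combosA]
  | cons x r ih =>
    intro n
    cases n with
    | zero => simp [combosA]
    | succ n =>
      rw [combosA, List.sublistsLen_succ_cons]
      exact (((ih n).map _).append (ih (n + 1))).trans List.perm_append_comm

lemma inner_count (t : Int) (l : List (List Int)) (a : Int) :
    l.foldl (fun answer j => if j.sum ≤ t then answer + 1 else answer) a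
      = a + ((l.countP (fun j => decide (j.sum ≤ t)) : Nat) : Int) := by
  have := PySem.List.foldl_count_if (fun j : List Int => decide (j.sum ≤ t)) l a
  simpa using this

lemma range_ite_sum (G : Nat → Int) (k : Int) (hk : 0 ≤ k) (n : Nat) :
    ((List.range n).map (fun (i : Nat) => if k ≤ (i : Int) then G i else 0)).sum
      = ((List.range (((n : Nat) : Int) - k).toNat).map (fun (j : Nat) => G (k + (j : Int)).toNat)).sum := by
  by_cases hcase : k.toNat ≤ n
  · have hm : ((n : Int) - k).toNat = n - k.toNat := by omega
    have hsplit : n = k.toNat + (n - k.toNat) := by omega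
    have hr : List.range n = List.range k.toNat ++ List.map (fun x => k.toNat + x) (List.range (n - k.toNat)) := by
      conv_lhs => rw [hsplit]
      rw [List.range_add]
    rw [hm, hr, List.map_append, List.sum_append, List.map_map]
    have hzero : ((List.range k.toNat).map (fun (i : Nat) => if k ≤ (i : Int) then G i else 0)).sum = 0 := by
      rw [List.map_congr_left (g := fun _ => (0 : Int)) ?_]
      · simp
      · intro i hi
        have : (i : Int) < k := by have := List.mem_range.1 hi; omega
        simp [not_le.2 this]
    rw [hzero, zero_add]
    apply congrArg
    apply List.map_congr_left
    intro j hj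
    have h2 : k ≤ ((k.toNat + j : Nat) : Int) := by omega
    have h1 : (k + (j : Int)).toNat = k.toNat + j := by omega
    simp only [Function.comp, h2, if_pos, h1]
  · have hm : ((n : Int) - k).toNat = 0 := by omega
    rw [hm]
    simp only [List.range_zero, List.map_nil, List.sum_nil]
    rw [List.map_congr_left (g := fun _ => (0 : Int)) ?_]
    · simp
    · intro i hi
      have : ¬ k ≤ (i : Int) := by have := List.mem_range.1 hi; omega
      simp [this]

lemma a_eq_countP (arr : List Int) (k t : Int) (hk : 0 ≤ k) :
    solution arr k t
      = ((arr.sublists'.countP (fun s => decide (k ≤ (s.length : Int) ∧ s.sum ≤ t)) : Nat) : Int) := by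
  -- rewrite A's double fold into a sum over the range
  have hA : solution arr k t
      = ((List.range (((arr.length : Int) + 1 - k).toNat)).map (fun j : Nat =>
          ((List.countP (fun s => decide (s.sum ≤ t))
            (List.sublistsLen (k + (j : Int)).toNat arr) : Nat) : Int))).sum := by
    unfold solution
    have hbody : ∀ (answer : Int) (i : Int),
        (combosA arr i.toNat).foldl (fun answer j => if j.sum ≤ t then answer + 1 else answer) answer
        = answer + ((List.countP (fun s => decide (s.sum ≤ t))
            (List.sublistsLen i.toNat arr) : Nat) : Int) := by
      intro answer i
      rw [inner_count, (combosA_perm arr i.toNat).countP_eq]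
    calc (PySem.List.pyRange k ((arr.length : Int) + 1) 1).foldl
          (fun answer i =>
            (combosA arr i.toNat).foldl (fun answer j => if j.sum ≤ t then answer + 1 else answer) answer) 0
        = (PySem.List.pyRange k ((arr.length : Int) + 1) 1).foldl
          (fun answer i => answer + ((List.countP (fun s => decide (s.sum ≤ t))
            (List.sublistsLen i.toNat arr) : Nat) : Int)) 0 := by
          exact List.foldl_ext _ _ 0 (fun acc b _ => hbody acc b)
      _ = _ := by
          rw [PySem.List.foldl_add, PySem.List.pyRange_one, List.map_map]
          simp only [zero_add]
          rfl
  rw [hA]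
  -- rewrite the countP over sublists' into the same sum
  have hperm := (List.range_bind_sublistsLen_perm arr).symm
  rw [hperm.countP_eq]
  rw [List.countP_flatMap]
  have hterm : ∀ i ∈ List.range (arr.length + 1),
      (List.countP (fun s => decide (k ≤ (s.length : Int) ∧ s.sum ≤ t)) ∘
        fun n => List.sublistsLen n arr) i
      = if k ≤ (i : Int) then List.countP (fun s => decide (s.sum ≤ t)) (List.sublistsLen i arr) else 0 := by
    intro i _
    simp only [Function.comp]
    by_cases hki : k ≤ (i : Int)
    · rw [if_pos hki]
      apply List.countP_congr
      intro s hs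
      have hlen : s.length = i := List.length_of_sublistsLen hs
      simp [hlen, hki]
    · rw [if_neg hki]
      rw [List.countP_eq_zero]
      intro s hs
      have hlen : s.length = i := List.length_of_sublistsLen hs
      simp [hlen, hki]
  rw [List.map_congr_left hterm]
  -- now both sides are sums over ranges; align them
  rw [Nat.cast_list_sum, List.map_map]
  have hcast : ∀ i ∈ List.range (arr.length + 1),
      ((fun x : Nat => (x : Int)) ∘ fun (i : Nat) =>
        if k ≤ (i : Int) then List.countP (fun s => decide (s.sum ≤ t)) (List.sublistsLen i arr) else 0) i
      = (fun (i : Nat) => if k ≤ (i : Int) then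
          ((List.countP (fun s => decide (s.sum ≤ t)) (List.sublistsLen i arr) : Nat) : Int) else 0) i := by
    intro i _
    simp only [Function.comp]
    split_ifs <;> simp
  rw [List.map_congr_left hcast]
  rw [range_ite_sum (fun i => ((List.countP (fun s => decide (s.sum ≤ t))
      (List.sublistsLen i arr) : Nat) : Int)) k hk (arr.length + 1)]
  have hM : ((((arr.length + 1 : Nat)) : Int) - k).toNat = ((arr.length : Int) + 1 - k).toNat := by
    omega
  rw [hM]

-- ===== VERDICT (by name: the statement is the Claim_ definition above) =====
theorem solution_spec : Claim_equal_solution := by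
  intro arr k t _ hpre
  unfold Spec_solution
  rw [a_eq_countP arr k t hpre, alt_eq_countP arr k t]
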